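-- pv_equiv track=rewrite | github.com/nobrain711/BeajoonHub | 프로그래머스/1/12932. 자연수 뒤집어 배열로 만들기/자연수 뒤집어 배열로 만들기.py | solution
-- ===== SOURCE A (Python) =====
-- def solution(n):
--     answer = []
--     while True:
--         answer.append(n%10)
--         n = n//10
--
--         if n == 0:
--             break
--
--     return answer
-- ===== SOURCE B (Python) =====
-- def solution(n):
--     return [int(c) for c in str(n)[::-1]]
-- ===== Notes on version B (the rewrite author's own statement) =====
-- stated objective: idiomatic
-- what changed: Replaces the mod/floordiv accumulation loop by converting n to its decimal string, reversing it, and mapping each character back to an int.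
import Mathlib
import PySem

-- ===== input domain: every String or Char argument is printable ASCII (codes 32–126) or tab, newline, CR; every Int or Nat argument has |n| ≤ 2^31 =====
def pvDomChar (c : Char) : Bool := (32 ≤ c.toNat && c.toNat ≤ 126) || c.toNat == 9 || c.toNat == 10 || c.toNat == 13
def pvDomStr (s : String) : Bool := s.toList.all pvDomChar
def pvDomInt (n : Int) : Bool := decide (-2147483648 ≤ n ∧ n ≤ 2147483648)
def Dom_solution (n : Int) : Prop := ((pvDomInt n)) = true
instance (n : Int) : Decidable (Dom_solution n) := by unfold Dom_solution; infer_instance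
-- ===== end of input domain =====

-- B replaces A's mod/floordiv loop by reversing str(n) and mapping each char back to int (idiomatic).

-- ===== PORT A =====
-- A's `while True` loop; the fuel n.toNat + 1 suffices for every n ≥ 0 (each
-- iteration floor-divides a positive n by 10); for n < 0 the Python loop never
-- terminates, which Pre_solution excludes.
def solutionLoopA : Nat → Int → List Int → List Int
  | 0, _, acc => acc
  | fuel + 1, n, acc =>
    let acc' := acc ++ [PySem.Int.mod n 10]
    let n' := PySem.Int.floordiv n 10
    if n' = 0 then acc' else solutionLoopA fuel n' acc'

def solution (n : Int) : List Int := solutionLoopA (n.toNat + 1) n []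

-- ===== PORT B =====
-- str(n)[::-1] is ported as reversal of the char list (PySem.Str.slice?_none_none_neg_one);
-- int(c) as PySem.Int.ofStr? — on Pre_ every char of str(n) is a decimal digit, so it is
-- always `some` and the getD default is never used.
def solution_alt (n : Int) : List Int :=
  ((PySem.Int.toChars n).reverse).map (fun c => (PySem.Int.ofStr? (String.ofList [c])).getD 0)

-- ===== PRECONDITION & SPEC =====
-- Pre_ excludes n < 0: there A's loop never terminates (n//10 stabilises at -1), so A returns no value.
def Pre_solution (n : Int) : Prop := 0 ≤ n
instance (n : Int) : Decidable (Pre_solution n) := by unfold Pre_solution; infer_instance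
def pvWitness_solution : Int := 1230

def Spec_solution (n : Int) (out : List Int) : Prop := out = solution_alt n
instance (n : Int) (out : List Int) : Decidable (Spec_solution n out) := by unfold Spec_solution; infer_instance

-- ===== CLAIM (what is proved, stated in full; the proofs are below) =====
def Claim_equal_solution : Prop := ∀ (n : Int), Dom_solution n → Pre_solution n → Spec_solution n (solution n)

-- ===== LEMMAS AND PROOFS =====

-- canonical reversed digit list of a natural number, used on both sides of the proof
def revDigits (m : Nat) : List Int :=
  (m % 10 : Nat) ::
    (if h : m / 10 = 0 then [] else revDigits (m / 10))
termination_by m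
decreasing_by exact Nat.div_lt_self (by omega) (by omega)

-- the single-character int() used by B, applied to the digit character of m % 10
lemma ofChars_digitChar_mod (m : Nat) :
    (PySem.Int.ofChars? [Nat.digitChar (m % 10)]).getD 0 = (m : Int) % 10 := by
  obtain ⟨d, hd, hm⟩ : ∃ d, d < 10 ∧ m % 10 = d := ⟨m % 10, Nat.mod_lt _ (by omega), rfl⟩
  rw [hm, show ((m : Int) % 10) = ((m % 10 : Nat) : Int) by push_cast; ring, hm]
  interval_cases d <;> decide

-- A's loop computes revDigits
lemma loopA_eq (fuel m : Nat) (acc : List Int) (h : m < fuel) :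
    solutionLoopA fuel (m : Int) acc = acc ++ revDigits m := by
  induction fuel generalizing m acc with
  | zero => omega
  | succ fuel ih =>
    rw [solutionLoopA]
    have hmod : PySem.Int.mod (m : Int) 10 = ((m % 10 : Nat) : Int) := by
      rw [PySem.Int.mod_eq_emod_of_pos (by norm_num)]; push_cast; ring
    have hdiv : PySem.Int.floordiv (m : Int) 10 = ((m / 10 : Nat) : Int) := by
      rw [PySem.Int.floordiv_eq_ediv_of_pos (by norm_num)]; push_cast; ring
    rw [hmod, hdiv, revDigits]
    by_cases h0 : m / 10 = 0
    · simp [h0]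
    · have hne : ((m / 10 : Nat) : Int) ≠ 0 := by exact_mod_cast h0
      have hlt : m / 10 < fuel := by
        have := Nat.div_lt_self (n := m) (by omega) (by omega : (1:Nat) < 10)
        omega
      rw [if_neg hne, dif_neg h0, ih (m / 10) _ hlt]
      simp

-- Nat.toDigitsCore (the engine behind str(n) for n ≥ 0), reversed and mapped back, is revDigits
lemma toDigitsCore_rev (fuel m : Nat) (ds : List Char) (h : m < fuel) :
    ((Nat.toDigitsCore 10 fuel m ds).reverse).map
        (fun c => (PySem.Int.ofStr? (String.ofList [c])).getD 0)
      = (ds.reverse).map (fun c => (PySem.Int.ofStr? (String.ofList [c])).getD 0) ++ revDigits m := by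
  induction fuel generalizing m ds with
  | zero => omega
  | succ fuel ih =>
    rw [Nat.toDigitsCore, revDigits]
    by_cases h0 : m / 10 = 0
    · simp only [h0, if_pos, dif_pos]
      simp [ofChars_digitChar_mod]
    · have hlt : m / 10 < fuel := by
        have := Nat.div_lt_self (n := m) (by omega) (by omega : (1:Nat) < 10)
        omega
      rw [if_neg h0, dif_neg h0, ih (m / 10) _ hlt]
      simp [ofChars_digitChar_mod]

-- ===== VERDICT (by name: the statement is the Claim_ definition above) =====
theorem solution_spec : Claim_equal_solution := by
  intro n _ hpre
  unfold Pre_solution at hpre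
  obtain ⟨m, rfl⟩ : ∃ m : Nat, n = (m : Int) := ⟨n.toNat, by omega⟩
  unfold Spec_solution solution solution_alt PySem.Int.toChars
  rw [if_neg (by omega : ¬ (m : Int) < 0), Int.toNat_natCast,
    loopA_eq (m + 1) m [] (by omega),
    Nat.toDigits, toDigitsCore_rev (m + 1) m [] (by omega)]
  simp
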